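-- pv_equiv track=rewrite | github.com/kimyenac/Algorithm | 프로그래머스/unrated/181926. 수 조작하기 1/수 조작하기 1.py | solution
-- ===== SOURCE A (Python) =====
-- def solution(n, control):
--     for c in control:
--         if (c == 'w'):
--             n += 1
--         elif (c == 'a'):
--             n -= 10
--         elif (c == 's'):
--             n -= 1
--         else:
--             n += 10
--     return n
-- ===== SOURCE B (Python) =====
-- def solution(n, control):
--     w = control.count('w')
--     a = control.count('a')
--     s = control.count('s')
--     other = len(control) - w - a - s
--     return n + w - 10 * a - s + 10 * other
-- ===== Notes on version B (the rewrite author's own statement) =====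
-- stated objective: simpler
-- what changed: Replaces the per-character branching loop with a closed-form expression over aggregate character counts (count of 'w', 'a', 's'; every other character contributes +10 via len minus those counts).
import Mathlib
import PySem

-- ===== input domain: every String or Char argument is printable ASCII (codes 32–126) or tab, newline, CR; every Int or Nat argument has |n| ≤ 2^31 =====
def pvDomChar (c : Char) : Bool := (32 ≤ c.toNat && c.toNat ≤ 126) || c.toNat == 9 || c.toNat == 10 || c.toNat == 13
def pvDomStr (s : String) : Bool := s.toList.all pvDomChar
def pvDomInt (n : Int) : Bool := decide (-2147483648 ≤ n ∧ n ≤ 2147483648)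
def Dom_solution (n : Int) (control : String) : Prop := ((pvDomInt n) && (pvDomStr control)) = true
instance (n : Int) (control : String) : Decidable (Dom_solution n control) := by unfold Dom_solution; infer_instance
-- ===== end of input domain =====

-- B replaces A's per-character branching loop by a closed-form expression over
-- character counts (objective: simpler).

-- ===== PORT A =====
def solution (n : Int) (control : String) : Int :=
  control.toList.foldl
    (fun n c =>
      if c = 'w' then n + 1
      else if c = 'a' then n - 10
      else if c = 's' then n - 1
      else n + 10) n

-- ===== PORT B =====
def solution_alt (n : Int) (control : String) : Int :=
  let w : Int := PySem.Str.count control "w"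
  let a : Int := PySem.Str.count control "a"
  let s : Int := PySem.Str.count control "s"
  let other : Int := PySem.Str.len control - w - a - s
  n + w - 10 * a - s + 10 * other

-- ===== PRECONDITION & SPEC =====
def Spec_solution (n : Int) (control : String) (out : Int) : Prop := out = solution_alt n control
instance (n : Int) (control : String) (out : Int) : Decidable (Spec_solution n control out) := by unfold Spec_solution; infer_instance

-- ===== CLAIM (what is proved, stated in full; the proofs are below) =====
def Claim_equal_solution : Prop := ∀ (n : Int) (control : String), Dom_solution n control → Spec_solution n control (solution n control)

-- ===== LEMMAS AND PROOFS =====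

-- Counting a single-character substring equals the list count of that character.
theorem chars_count_go_single (c : Char) (l : List Char) (acc fuel : Nat)
    (h : l.length ≤ fuel) :
    PySem.Chars.count.go [c] fuel l acc = acc + l.count c := by
  induction l generalizing fuel acc with
  | nil => cases fuel <;> simp [PySem.Chars.count.go]
  | cons x t ih =>
    cases fuel with
    | zero => simp at h
    | succ m =>
      simp only [List.length_cons, Nat.add_le_add_iff_right] at h
      rw [PySem.Chars.count.go]
      simp only [List.isPrefixOf, Bool.and_true, List.length_cons,
        List.length_nil, Nat.zero_add, List.drop_succ_cons, List.drop_zero, List.count_cons]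
      by_cases hx : c = x
      · subst hx
        rw [if_pos (by simp), ih (acc + 1) m h]
        simp
        omega
      · have hb : (c == x) = false := by simp [hx]
        have hb2 : (x == c) = false := by simp [Ne.symm hx]
        simp [hb, hb2, ih acc m h]

theorem chars_count_single (c : Char) (s : List Char) :
    PySem.Chars.count s [c] = s.count c := by
  simp [PySem.Chars.count, chars_count_go_single c s 0 s.length le_rfl]

-- B's value restated over the char list.
theorem solution_alt_chars (n : Int) (control : String) :
    solution_alt n control =
      n + (control.toList.count 'w' : Int)
        - 10 * (control.toList.count 'a' : Int)
        - (control.toList.count 's' : Int)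
        + 10 * ((control.toList.length : Int)
            - (control.toList.count 'w' : Int)
            - (control.toList.count 'a' : Int)
            - (control.toList.count 's' : Int)) := by
  simp only [solution_alt, PySem.Str.count, PySem.Str.len]
  rw [show ("w" : String).toList = ['w'] from rfl, show ("a" : String).toList = ['a'] from rfl,
    show ("s" : String).toList = ['s'] from rfl]
  rw [chars_count_single, chars_count_single, chars_count_single]

-- A's fold computed in closed form.
theorem solution_foldl (cs : List Char) (n : Int) :
    List.foldl
      (fun n c =>
        if c = 'w' then n + 1
        else if c = 'a' then n - 10
        else if c = 's' then n - 1
        else n + 10) n cs =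
      n + (cs.count 'w' : Int) - 10 * (cs.count 'a' : Int) - (cs.count 's' : Int)
        + 10 * ((cs.length : Int) - (cs.count 'w' : Int) - (cs.count 'a' : Int)
            - (cs.count 's' : Int)) := by
  induction cs generalizing n with
  | nil => simp
  | cons c cs ih =>
    simp only [List.foldl_cons, List.count_cons, List.length_cons]
    rw [ih]
    split_ifs with h1 h2 h3 <;> simp_all <;> ring

-- ===== VERDICT (by name: the statement is the Claim_ definition above) =====
theorem solution_spec : Claim_equal_solution := by
  intro n control _
  show _ = _
  rw [solution_alt_chars]
  unfold solution
  exact solution_foldl control.toList n
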